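-- pv_equiv track=rewrite | github.com/GasStationMan/eternal_return | improved_mcfunction/improved_mcfucntion.py | replaceLinebreak
-- ===== SOURCE A (Python) =====
-- def replaceLinebreak(string : str) -> str:
--     i = 0
--     length = len(string)
--     while(i < length):
--         if(string[i] == "\\"):
--             if(i + 1 < length and string[i + 1] != "u"): #\u0000 형태인지 확인
--                 string = string[:i] + " " + string[i+1:]
--             elif(i + 1 == length):
--                 string = string[:i] + " " + string[i+1:]
--         i = i + 1
--     return string
-- ===== SOURCE B (Python) =====
-- import re
--
-- def replaceLinebreak(string: str) -> str:
--     # replace every backslash not followed by a lowercase 'u' (incl. a trailing one) with a space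
--     return re.sub(r'\\(?!u)', ' ', string)
-- ===== Notes on version B (the rewrite author's own statement) =====
-- stated objective: faster
-- what changed: Replaces the index-driven while loop that rebuilds the string by slicing with a single regex substitution using a negative lookahead, replacing each backslash not followed by a lowercase u with a space.
import Mathlib
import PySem

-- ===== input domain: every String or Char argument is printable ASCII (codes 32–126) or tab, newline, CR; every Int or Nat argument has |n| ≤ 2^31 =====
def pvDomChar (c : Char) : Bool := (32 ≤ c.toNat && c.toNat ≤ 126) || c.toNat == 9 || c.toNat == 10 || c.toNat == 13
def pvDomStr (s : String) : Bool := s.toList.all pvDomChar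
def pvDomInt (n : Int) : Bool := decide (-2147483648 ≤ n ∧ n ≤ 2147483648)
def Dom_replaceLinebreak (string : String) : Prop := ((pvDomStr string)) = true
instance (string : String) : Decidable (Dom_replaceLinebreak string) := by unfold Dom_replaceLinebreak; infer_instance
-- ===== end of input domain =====

-- B replaces A's index-driven while loop (string rebuilt by slicing) with a single
-- regex substitution re.sub(r'\\(?!u)', ' ', s); same return value, more idiomatic.

-- ===== PORT A =====
-- A's while loop: index i over the (mutated) string; the string's length never changes,
-- so the loop terminates; replacement string[:i] + " " + string[i+1:] is take/drop.
def pvLoopA (s : List Char) (i : Nat) : List Char :=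
  if hi : i < s.length then
    let s' :=
      if s[i] = '\\' then
        if i + 1 < s.length ∧ s[i + 1]? ≠ some 'u' then
          s.take i ++ ' ' :: s.drop (i + 1)
        else if i + 1 = s.length then
          s.take i ++ ' ' :: s.drop (i + 1)
        else s
      else s
    pvLoopA s' (i + 1)
  else s
termination_by s.length - i
decreasing_by
  all_goals
    split_ifs <;>
      (try simp only [List.length_append, List.length_take, List.length_cons, List.length_drop]) <;>
      omega

def replaceLinebreak (string : String) : String :=
  String.ofList (pvLoopA string.toList 0)

-- ===== PORT B =====
-- Port of re.sub(r'\\(?!u)', ' ', s): the regex engine scans left to right; at each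
-- position a length-1 match '\' succeeds iff the (zero-width) lookahead sees no 'u'
-- next (end of string also succeeds); matched '\' is replaced by ' ', everything else
-- is copied. Exact for this pattern, whose matches never consume the lookahead char.
def pvSubB : List Char → List Char
  | [] => []
  | c :: rest =>
    (if c = '\\' ∧ rest.head? ≠ some 'u' then ' ' else c) :: pvSubB rest

def replaceLinebreak_alt (string : String) : String :=
  String.ofList (pvSubB string.toList)

-- ===== PRECONDITION & SPEC =====
def Spec_replaceLinebreak (string : String) (out : String) : Prop := out = replaceLinebreak_alt string
instance (string : String) (out : String) : Decidable (Spec_replaceLinebreak string out) := by unfold Spec_replaceLinebreak; infer_instance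

-- ===== CLAIM (what is proved, stated in full; the proofs are below) =====
def Claim_equal_replaceLinebreak : Prop := ∀ (string : String), Dom_replaceLinebreak string → Spec_replaceLinebreak string (replaceLinebreak string)

-- ===== LEMMAS AND PROOFS =====

theorem pvTake_len (s : List Char) (i : Nat) (hi : i < s.length) :
    (s.take i).length = i := by
  simp [Nat.min_eq_left hi.le]

theorem pvTake_succ' (s : List Char) (i : Nat) (hi : i < s.length) :
    s.take (i + 1) = s.take i ++ [s[i]] := by
  rw [List.take_add_one, List.getElem?_eq_getElem hi]
  rfl

theorem pvRepl_take (s : List Char) (i : Nat) (hi : i < s.length) :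
    (s.take i ++ ' ' :: s.drop (i + 1)).take (i + 1) = s.take i ++ [' '] := by
  rw [List.take_append, pvTake_len s i hi,
    List.take_of_length_le (by rw [pvTake_len s i hi]; omega)]
  simp

theorem pvRepl_drop (s : List Char) (i : Nat) (hi : i < s.length) :
    (s.take i ++ ' ' :: s.drop (i + 1)).drop (i + 1) = s.drop (i + 1) := by
  rw [List.drop_append, pvTake_len s i hi,
    List.drop_of_length_le (by rw [pvTake_len s i hi]; omega)]
  simp

theorem pvRepl_len (s : List Char) (i : Nat) (hi : i < s.length) :
    (s.take i ++ ' ' :: s.drop (i + 1)).length = s.length := by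
  simp; omega

theorem pvLoopA_eq (n : Nat) : ∀ (s : List Char) (i : Nat), s.length - i = n →
    pvLoopA s i = s.take i ++ pvSubB (s.drop i) := by
  induction n with
  | zero =>
    intro s i h
    have hge : s.length ≤ i := by omega
    rw [pvLoopA]
    simp [Nat.not_lt.mpr hge, List.take_of_length_le hge, List.drop_of_length_le hge, pvSubB]
  | succ n ih =>
    intro s i h
    have hi : i < s.length := by omega
    rw [pvLoopA]
    simp only [hi, dif_pos]
    have hdrop : s.drop i = s[i] :: s.drop (i + 1) := List.drop_eq_getElem_cons hi
    by_cases hb : s[i] = '\\'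
    · by_cases h1 : i + 1 < s.length ∧ s[i + 1]? ≠ some 'u'
      · -- next char exists and is not 'u': replace
        rw [if_pos hb, if_pos h1,
          ih _ (i + 1) (by rw [pvRepl_len s i hi]; omega),
          pvRepl_take s i hi, pvRepl_drop s i hi, hdrop, pvSubB]
        simp [hb, h1.2]
      · by_cases h2 : i + 1 = s.length
        · -- trailing backslash: replace
          rw [if_pos hb, if_neg h1, if_pos h2,
            ih _ (i + 1) (by rw [pvRepl_len s i hi]; omega),
            pvRepl_take s i hi, pvRepl_drop s i hi, hdrop]
          have hde : s.drop (i + 1) = [] := List.drop_of_length_le (by omega)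
          rw [hde, pvSubB]
          simp [hb, pvSubB]
        · -- backslash followed by 'u': keep
          have hlt : i + 1 < s.length := by omega
          have hu : s[i + 1] = 'u' := by
            by_contra hc
            exact h1 ⟨hlt, by simp [List.getElem?_eq_getElem hlt, hc]⟩
          rw [if_pos hb, if_neg h1, if_neg h2, ih s (i + 1) (by omega),
            hdrop, pvSubB, pvTake_succ' s i hi]
          simp [hb, List.drop_eq_getElem_cons hlt, hu]
    · -- not a backslash: keep
      rw [if_neg hb, ih s (i + 1) (by omega), hdrop, pvSubB,
        pvTake_succ' s i hi, List.append_assoc]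
      simp [hb]

-- ===== VERDICT (by name: the statement is the Claim_ definition above) =====
theorem replaceLinebreak_spec : Claim_equal_replaceLinebreak := by
  intro string _
  unfold Spec_replaceLinebreak replaceLinebreak replaceLinebreak_alt
  rw [pvLoopA_eq (string.toList.length - 0) string.toList 0 rfl]
  simp
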